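-- pv_equiv track=rewrite | github.com/ArthurVerrez/project-euler | PE29.py | dist_powers
-- ===== SOURCE A (Python) =====
-- def dist_powers(n):
--     r=[]
--     for a in range(2,n+1):
--         for b in range(2,n+1):
--             aux=a**b
--             if aux not in r:
--                 r.append(aux)
--     return len(r)
-- ===== SOURCE B (Python) =====
-- def dist_powers(n):
--     # Primitive-base algorithm: never forms any giant power a**b.
--     # Every base a in 2..n is uniquely m**j with m not itself a perfect power
--     # ("primitive"); then a**b = m**(j*b), and powers of distinct primitives
--     # never coincide.  So the answer is the sum, over primitive m <= n, of the
--     # number of distinct products j*b with 1 <= j <= J(m) (J(m) = max power of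
--     # m still <= n) and 2 <= b <= n.
--     # Stage 1: collect all perfect powers <= n (the non-primitive bases).
--     perfect = set()
--     c = 2
--     while c * c <= n:
--         p = c * c
--         while p <= n:
--             perfect.add(p)
--             p *= c
--         c += 1
--     # Stage 2: per primitive base, count distinct exponents j*b.
--     total = 0
--     for m in range(2, n + 1):
--         if m in perfect:
--             continue
--         j_max = 1
--         q = m
--         while q * m <= n:
--             q *= m
--             j_max += 1
--         total += len({j * b for j in range(1, j_max + 1) for b in range(2, n + 1)})
--     return total
-- ===== Notes on version B (the rewrite author's own statement) =====
-- stated objective: faster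
-- what changed: Replaces brute-force enumeration of every giant power a**b with the primitive-base algorithm: every base is uniquely a power of a non-perfect-power primitive m, so the answer is the sum over primitives of the number of distinct products of the power-index with an exponent from the original range; no value larger than n is ever formed.
import Mathlib
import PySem

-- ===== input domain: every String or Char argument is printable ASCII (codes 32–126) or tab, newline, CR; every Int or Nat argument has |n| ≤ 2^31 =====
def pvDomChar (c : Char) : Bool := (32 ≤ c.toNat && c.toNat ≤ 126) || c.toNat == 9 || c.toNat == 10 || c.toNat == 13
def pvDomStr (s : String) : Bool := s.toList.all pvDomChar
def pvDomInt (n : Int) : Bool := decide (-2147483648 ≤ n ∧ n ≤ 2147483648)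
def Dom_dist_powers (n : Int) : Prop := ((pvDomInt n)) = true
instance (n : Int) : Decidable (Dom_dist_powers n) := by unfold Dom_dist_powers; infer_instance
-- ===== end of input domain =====

-- B replaces A's brute-force enumeration of every a**b by the primitive-base
-- algorithm: each base is uniquely a power of a non-perfect-power "primitive" m,
-- and the answer is the sum over primitives m ≤ n of the number of distinct
-- exponent products j*b (objective: faster; B never forms the giant powers).


-- ===== PORT A =====
-- r = []; for a in 2..n: for b in 2..n: aux = a**b; if aux not in r: r.append(aux); return len(r)
def dist_powers (n : Int) : Int :=
  let r : List Int :=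
    (PySem.List.pyRange 2 (n+1)).foldl (fun r a =>
      (PySem.List.pyRange 2 (n+1)).foldl (fun r b =>
        let aux := a ^ b.toNat
        if r.contains aux then r else r ++ [aux]) r) []
  (r.length : Int)

-- ===== PORT B =====
-- Stage-1 inner while loop: while p <= n: perfect.add(p); p *= c
-- (the '2 ≤ c ∧ 2 ≤ p' conjuncts are totality guards only; they hold on every
--  reachable call, where c starts at 2 and p at c*c)
def ppInner (n c p : Int) (s : PySem.Set Int) : PySem.Set Int :=
  if h : 2 ≤ c ∧ 2 ≤ p ∧ p ≤ n then ppInner n c (p * c) (PySem.Set.add s p) else s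
termination_by (n + 1 - p).toNat
decreasing_by
  have h1 : p + 1 ≤ p * c := by nlinarith [h.1, h.2.1]
  omega

-- Stage-1 outer while loop: while c*c <= n: <inner loop from p=c*c>; c += 1
def ppOuter (n c : Int) (s : PySem.Set Int) : PySem.Set Int :=
  if h : 2 ≤ c ∧ c * c ≤ n then ppOuter n (c + 1) (ppInner n c (c * c) s) else s
termination_by (n + 1 - c).toNat
decreasing_by
  have h1 : c ≤ c * c := by nlinarith [h.1]
  omega

-- Stage-2 while loop: j_max = 1; q = m; while q*m <= n: q *= m; j_max += 1
def jmaxLoop (n m q j : Int) : Int :=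
  if h : 2 ≤ m ∧ 2 ≤ q ∧ q * m ≤ n then jmaxLoop n m (q * m) (j + 1) else j
termination_by (n + 1 - q).toNat
decreasing_by
  have h1 : q + 1 ≤ q * m := by nlinarith [h.1, h.2.1]
  omega

-- perfect = set(); c = 2; <stage-1 loops>; then
-- total = 0
-- for m in 2..n: if m in perfect: continue; j_max = <stage-2 loop>;
--                total += len({j*b for j in 1..j_max for b in 2..n})
def dist_powers_alt (n : Int) : Int :=
  let perfect := ppOuter n 2 PySem.Set.empty
  (PySem.List.pyRange 2 (n + 1)).foldl (fun total m =>
    if perfect.contains m then total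
    else
      let jmax := jmaxLoop n m m 1
      let prods := (PySem.List.pyRange 1 (jmax + 1)).foldl (fun s j =>
          (PySem.List.pyRange 2 (n + 1)).foldl (fun s b => PySem.Set.add s (j * b)) s)
        PySem.Set.empty
      total + PySem.Set.len prods) 0

-- ===== PRECONDITION & SPEC =====
def Spec_dist_powers (n : Int) (out : Int) : Prop := out = dist_powers_alt n
instance (n : Int) (out : Int) : Decidable (Spec_dist_powers n out) := by unfold Spec_dist_powers; infer_instance

-- ===== CLAIM (what is proved, stated in full; the proofs are below) =====
def Claim_equal_dist_powers : Prop := ∀ (n : Int), Dom_dist_powers n → Spec_dist_powers n (dist_powers n)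

-- ===== LEMMAS AND PROOFS =====

-- The list of all powers a**b that A's nested loops enumerate, in order.
def bigList (n : Int) : List Int :=
  (PySem.List.pyRange 2 (n+1)).flatMap (fun a =>
    (PySem.List.pyRange 2 (n+1)).map (fun b => a ^ b.toNat))

-- The list of exponent products j*b that B's set comprehension enumerates for one primitive.
def prodList (n jmax : Int) : List Int :=
  (PySem.List.pyRange 1 (jmax + 1)).flatMap (fun j =>
    (PySem.List.pyRange 2 (n+1)).map (fun b => j * b))

-- "m is not a perfect power" (the bases B's stage 2 keeps).
def IsPrim (m : Int) : Prop := ∀ (d : Int) (k : ℕ), 2 ≤ d → 2 ≤ k → m ≠ d ^ k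

-- ---- A's value is the cardinality of the set of enumerated powers ----

lemma A_eq_card (n : Int) : dist_powers n = ((bigList n).toFinset.card : Int) := by
  have h1 : (PySem.List.pyRange 2 (n+1)).foldl (fun r a =>
      (PySem.List.pyRange 2 (n+1)).foldl (fun r b =>
        let aux := a ^ b.toNat
        if r.contains aux then r else r ++ [aux]) r) [] = PySem.Set.ofList (bigList n) := by
    simp only [bigList, PySem.Set.ofList_eq_foldl, List.foldl_flatMap, List.foldl_map]
    rfl
  have h2 : (bigList n).toFinset.card = (PySem.Set.ofList (bigList n)).length := by
    rw [← List.toFinset_card_of_nodup (PySem.Set.nodup_ofList _)]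
    congr 1
    ext x
    simp [PySem.Set.mem_ofList]
  simp only [dist_powers]
  rw [h1, h2]

-- ---- stage-1 loop characterizations ----

lemma ppInner_mem (n c : Int) : ∀ (p : Int) (s : PySem.Set Int) (x : Int),
    2 ≤ c → 2 ≤ p →
    (x ∈ ppInner n c p s ↔ x ∈ s ∨ ∃ t : ℕ, x = p * c ^ t ∧ x ≤ n) := by
  intro p s x hc hp
  rw [ppInner]
  split_ifs with h
  · rw [ppInner_mem n c (p*c) (PySem.Set.add s p) x hc (by nlinarith)]
    constructor
    · rintro (hs | ⟨t, rfl, hle⟩)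
      · rcases (PySem.Set.mem_add s p x).mp hs with hs | rfl
        · exact Or.inl hs
        · exact Or.inr ⟨0, by ring, h.2.2⟩
      · exact Or.inr ⟨t+1, by ring, hle⟩
    · rintro (hs | ⟨t, rfl, hle⟩)
      · exact Or.inl ((PySem.Set.mem_add s p _).mpr (Or.inl hs))
      · cases t with
        | zero => exact Or.inl ((PySem.Set.mem_add s p _).mpr (Or.inr (by ring)))
        | succ t => exact Or.inr ⟨t, by ring, hle⟩
  · have hn : ¬ p ≤ n := fun hle => h ⟨hc, hp, hle⟩
    constructor
    · exact Or.inl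
    · rintro (hs | ⟨t, rfl, hle⟩)
      · exact hs
      · exfalso
        have hpt : p ≤ p * c ^ t :=
          le_mul_of_one_le_right (by omega) (one_le_pow₀ (by omega))
        omega
termination_by p => (n + 1 - p).toNat
decreasing_by
  have h1 : p + 1 ≤ p * c := by nlinarith [h.1, h.2.1]
  omega

lemma ppOuter_mem (n : Int) : ∀ (c : Int) (s : PySem.Set Int) (x : Int),
    2 ≤ c →
    (x ∈ ppOuter n c s ↔ x ∈ s ∨ ∃ (d : Int) (k : ℕ), c ≤ d ∧ 2 ≤ k ∧ x = d ^ k ∧ x ≤ n) := by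
  intro c s x hc
  rw [ppOuter]
  split_ifs with h
  · rw [ppOuter_mem n (c+1) _ x (by omega)]
    rw [ppInner_mem n c (c*c) s x hc (by nlinarith)]
    constructor
    · rintro ((hs | ⟨t, rfl, hle⟩) | ⟨d, k, hd, hk, rfl, hle⟩)
      · exact Or.inl hs
      · exact Or.inr ⟨c, t+2, le_refl c, by omega, by ring, hle⟩
      · exact Or.inr ⟨d, k, by omega, hk, rfl, hle⟩
    · rintro (hs | ⟨d, k, hd, hk, rfl, hle⟩)
      · exact Or.inl (Or.inl hs)
      · by_cases hdc : d = c
        · subst hdc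
          refine Or.inl (Or.inr ⟨k - 2, ?_, hle⟩)
          have h3 : d * d * d ^ (k - 2) = d ^ (k - 2 + 2) := by ring
          rw [show k - 2 + 2 = k from by omega] at h3
          exact h3.symm
        · exact Or.inr ⟨d, k, by omega, hk, rfl, hle⟩
  · have hn : ¬ c * c ≤ n := fun hle => h ⟨hc, hle⟩
    constructor
    · exact Or.inl
    · rintro (hs | ⟨d, k, hd, hk, rfl, hle⟩)
      · exact hs
      · exfalso
        have h1 : c * c ≤ d * d := by nlinarith
        have h2 : d * d ≤ d ^ k := by
          have h4 : d ^ 2 ≤ d ^ k := pow_le_pow_right₀ (by omega) hk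
          nlinarith [h4]
        omega
termination_by c => (n + 1 - c).toNat
decreasing_by
  have h1 : c ≤ c * c := by nlinarith [h.1]
  omega

lemma perf_mem (n x : Int) :
    x ∈ ppOuter n 2 PySem.Set.empty ↔ ∃ (d : Int) (k : ℕ), 2 ≤ d ∧ 2 ≤ k ∧ x = d ^ k ∧ x ≤ n := by
  rw [ppOuter_mem n 2 _ x (by norm_num)]
  simp [PySem.Set.empty]

-- ---- stage-2 loop characterization ----

lemma jmax_spec (n m : Int) (hm : 2 ≤ m) : ∀ (q j : Int), 2 ≤ q → q ≤ n →
    ∃ k : ℕ, jmaxLoop n m q j = j + k ∧ q * m ^ k ≤ n ∧ n < q * m ^ (k+1) := by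
  intro q j hq hqn
  rw [jmaxLoop]
  split_ifs with h
  · obtain ⟨k, hk1, hk2, hk3⟩ := jmax_spec n m hm (q*m) (j+1) (by nlinarith) h.2.2
    refine ⟨k+1, ?_, ?_, ?_⟩
    · rw [hk1]; push_cast; ring
    · have he : q * m ^ (k+1) = q * m * m ^ k := by ring
      rw [he]; exact hk2
    · have he : q * m ^ (k+1+1) = q * m * m ^ (k+1) := by ring
      rw [he]; exact hk3
  · have hnm : ¬ q * m ≤ n := fun hle => h ⟨hm, hq, hle⟩
    refine ⟨0, by simp, by simpa using hqn, ?_⟩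
    have he : q * m ^ (0+1) = q * m := by ring
    rw [he]; omega
termination_by q => (n + 1 - q).toNat
decreasing_by
  have h1 : q + 1 ≤ q * m := by nlinarith [h.1, h.2.1]
  omega

-- ---- number theory: unique primitive-root representation ----

lemma prim_pow_inj {a b i j : ℕ}
    (hpa : ∀ c k, 2 ≤ k → a ≠ c ^ k) (hpb : ∀ c k, 2 ≤ k → b ≠ c ^ k)
    (hi : 1 ≤ i) (hj : 1 ≤ j) (h : a ^ i = b ^ j) : a = b ∧ i = j := by
  obtain ⟨c, hac, hbc⟩ := Nat.exists_eq_pow_of_pow_eq_pow (Or.inl (by omega : i ≠ 0)) h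
  have hgi : i.gcd j ∣ i := Nat.gcd_dvd_left i j
  have hgj : i.gcd j ∣ j := Nat.gcd_dvd_right i j
  have hgpos : 0 < i.gcd j := Nat.gcd_pos_of_pos_left j (by omega)
  have hjg : 1 ≤ j / i.gcd j :=
    (Nat.one_le_div_iff hgpos).mpr (Nat.le_of_dvd (by omega) hgj)
  have hig : 1 ≤ i / i.gcd j :=
    (Nat.one_le_div_iff hgpos).mpr (Nat.le_of_dvd (by omega) hgi)
  have hj1 : j / i.gcd j = 1 := by
    by_contra hne
    exact hpa c (j / i.gcd j) (by omega) hac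
  have hi1 : i / i.gcd j = 1 := by
    by_contra hne
    exact hpb c (i / i.gcd j) (by omega) hbc
  have hieq : i = i.gcd j := by
    have h5 : i / i.gcd j * i.gcd j = i := Nat.div_mul_cancel hgi
    rw [hi1, one_mul] at h5
    exact h5.symm
  have hjeq : j = i.gcd j := by
    have h5 : j / i.gcd j * i.gcd j = j := Nat.div_mul_cancel hgj
    rw [hj1, one_mul] at h5
    exact h5.symm
  have hij : i = j := by omega
  subst hij
  exact ⟨Nat.pow_left_injective (by omega) h, rfl⟩

lemma exists_prim_rep : ∀ a : ℕ, 2 ≤ a →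
    ∃ m j, 2 ≤ m ∧ (∀ c k, 2 ≤ k → m ≠ c ^ k) ∧ 1 ≤ j ∧ a = m ^ j := by
  intro a
  induction a using Nat.strong_induction_on with
  | _ a ih =>
    intro ha
    by_cases hp : ∀ c k, 2 ≤ k → a ≠ c ^ k
    · exact ⟨a, 1, ha, hp, le_refl 1, (pow_one a).symm⟩
    · push Not at hp
      obtain ⟨c, k, hk, hack⟩ := hp
      have hc2 : 2 ≤ c := by
        by_contra hc
        push Not at hc
        have hle : c ^ k ≤ 1 := by
          calc c ^ k ≤ 1 ^ k := Nat.pow_le_pow_left (by omega) k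
          _ = 1 := one_pow k
        omega
      have hlt : c < a := by
        have h2 : c ^ 2 ≤ c ^ k := Nat.pow_le_pow_right (by omega) hk
        have h3 : c ^ 2 = c * c := sq c
        nlinarith
      obtain ⟨m, j, hm2, hmp, hj, hcm⟩ := ih c hlt hc2
      have hjk : 0 < j * k := Nat.mul_pos (by omega) (by omega)
      exact ⟨m, j * k, hm2, hmp, by omega, by rw [hack, hcm, ← pow_mul]⟩

-- Int versions
lemma prim_pow_injI {a b : Int} (ha2 : 2 ≤ a) (hb2 : 2 ≤ b)
    (hpa : IsPrim a) (hpb : IsPrim b) {i j : ℕ} (hi : 1 ≤ i) (hj : 1 ≤ j)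
    (h : a ^ i = b ^ j) : a = b ∧ i = j := by
  have haA : a = (a.toNat : Int) := (Int.toNat_of_nonneg (by omega)).symm
  have hbB : b = (b.toNat : Int) := (Int.toNat_of_nonneg (by omega)).symm
  have hN : a.toNat ^ i = b.toNat ^ j := by
    have h2 := congrArg Int.toNat h
    rwa [Int.toNat_pow_of_nonneg (by omega), Int.toNat_pow_of_nonneg (by omega)] at h2
  have conv2 : ∀ (z : Int), 2 ≤ z → IsPrim z → ∀ c k, 2 ≤ k → z.toNat ≠ c ^ k := by
    intro z hz hprim c k hk hEq
    have hc2 : 2 ≤ c := by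
      by_contra hc
      push Not at hc
      have hle : c ^ k ≤ 1 := by
        calc c ^ k ≤ 1 ^ k := Nat.pow_le_pow_left (by omega) k
        _ = 1 := one_pow k
      omega
    apply hprim (c : Int) k (by exact_mod_cast hc2) hk
    rw [(Int.toNat_of_nonneg (by omega : (0:Int) ≤ z)).symm, hEq]
    push_cast
    rfl
  obtain ⟨hab, hij⟩ := prim_pow_inj (conv2 a ha2 hpa) (conv2 b hb2 hpb) hi hj hN
  refine ⟨?_, hij⟩
  rw [haA, hbB, hab]

lemma exists_prim_repI (a : Int) (ha : 2 ≤ a) :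
    ∃ (m : Int) (j : ℕ), 2 ≤ m ∧ m ≤ a ∧ IsPrim m ∧ 1 ≤ j ∧ a = m ^ j := by
  obtain ⟨m, j, hm2, hmp, hj, hrep⟩ := exists_prim_rep a.toNat (by omega)
  have hma : m ≤ a.toNat := by
    calc m ≤ m ^ j := Nat.le_self_pow (by omega) m
    _ = a.toNat := hrep.symm
  refine ⟨(m : Int), j, by exact_mod_cast hm2, by omega, ?_, hj, ?_⟩
  · intro d k hd hk hEq
    apply hmp d.toNat k hk
    have h2 := congrArg Int.toNat hEq
    rwa [Int.toNat_natCast, Int.toNat_pow_of_nonneg (by omega)] at h2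
  · have h3 : a = (a.toNat : Int) := (Int.toNat_of_nonneg (by omega)).symm
    rw [h3, hrep]
    push_cast
    rfl

-- ---- B's value as a Finset sum ----

lemma B_eq_sum (n : Int) :
    dist_powers_alt n =
      ∑ m ∈ ((PySem.List.pyRange 2 (n+1)).toFinset.filter
               (fun m => ¬ (ppOuter n 2 PySem.Set.empty).contains m = true)),
        ((prodList n (jmaxLoop n m m 1)).toFinset.card : Int) := by
  have hlen : ∀ L : List Int,
      PySem.Set.len (PySem.Set.ofList L) = (L.toFinset.card : Int) := by
    intro L
    have h2 : L.toFinset.card = (PySem.Set.ofList L).length := by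
      rw [← List.toFinset_card_of_nodup (PySem.Set.nodup_ofList _)]
      congr 1
      ext x
      simp [PySem.Set.mem_ofList]
    rw [h2]
    rfl
  have h0 : dist_powers_alt n = (PySem.List.pyRange 2 (n + 1)).foldl (fun total m =>
      if (ppOuter n 2 PySem.Set.empty).contains m then total
      else total + PySem.Set.len ((PySem.List.pyRange 1 (jmaxLoop n m m 1 + 1)).foldl (fun s j =>
          (PySem.List.pyRange 2 (n + 1)).foldl (fun s b => PySem.Set.add s (j * b)) s)
        PySem.Set.empty)) 0 := rfl
  rw [h0]
  have h1 : (fun (total m : Int) =>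
      if (ppOuter n 2 PySem.Set.empty).contains m then total
      else total + PySem.Set.len ((PySem.List.pyRange 1 (jmaxLoop n m m 1 + 1)).foldl (fun s j =>
          (PySem.List.pyRange 2 (n + 1)).foldl (fun s b => PySem.Set.add s (j * b)) s)
        PySem.Set.empty))
      = fun (total m : Int) => total +
          (if (ppOuter n 2 PySem.Set.empty).contains m then 0
           else ((prodList n (jmaxLoop n m m 1)).toFinset.card : Int)) := by
    funext total m
    split_ifs with h
    · ring
    · have h3 : (PySem.List.pyRange 1 (jmaxLoop n m m 1 + 1)).foldl (fun s j =>
          (PySem.List.pyRange 2 (n + 1)).foldl (fun s b => PySem.Set.add s (j * b)) s)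
        PySem.Set.empty = PySem.Set.ofList (prodList n (jmaxLoop n m m 1)) := by
        simp only [prodList, PySem.Set.ofList_eq_foldl, List.foldl_flatMap, List.foldl_map]
        rfl
      rw [h3, hlen]
  rw [h1, PySem.List.foldl_add]
  rw [← List.sum_toFinset _ (PySem.List.nodup_pyRange_one 2 (n+1))]
  rw [Finset.sum_filter, zero_add]
  apply Finset.sum_congr rfl
  intro m _
  split_ifs with h2
  · rfl
  · rfl

-- ---- the counting theorem ----

lemma mem_bigList (n x : Int) : x ∈ bigList n ↔
    ∃ a b : Int, (2 ≤ a ∧ a < n + 1) ∧ (2 ≤ b ∧ b < n + 1) ∧ a ^ b.toNat = x := by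
  simp only [bigList, List.mem_flatMap, List.mem_map, PySem.List.mem_pyRange_one]
  constructor
  · rintro ⟨a, ha, b, hb, rfl⟩
    exact ⟨a, b, ha, hb, rfl⟩
  · rintro ⟨a, b, ha, hb, rfl⟩
    exact ⟨a, ha, b, hb, rfl⟩

lemma mem_prodList (n J x : Int) : x ∈ prodList n J ↔
    ∃ j b : Int, (1 ≤ j ∧ j < J + 1) ∧ (2 ≤ b ∧ b < n + 1) ∧ j * b = x := by
  simp only [prodList, List.mem_flatMap, List.mem_map, PySem.List.mem_pyRange_one]
  constructor
  · rintro ⟨j, hj, b, hb, rfl⟩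
    exact ⟨j, b, hj, hb, rfl⟩
  · rintro ⟨j, b, hj, hb, rfl⟩
    exact ⟨j, hj, b, hb, rfl⟩

lemma mem_Mfil (n m : Int) :
    m ∈ ((PySem.List.pyRange 2 (n+1)).toFinset.filter
          (fun m => ¬ (ppOuter n 2 PySem.Set.empty).contains m = true)) ↔
      2 ≤ m ∧ m < n + 1 ∧ IsPrim m := by
  simp only [Finset.mem_filter, List.mem_toFinset, PySem.List.mem_pyRange_one,
    PySem.Set.contains_iff, perf_mem]
  constructor
  · rintro ⟨⟨h2, hlt⟩, hnp⟩
    refine ⟨h2, hlt, ?_⟩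
    intro d k hd hk hEq
    exact hnp ⟨d, k, hd, hk, hEq, by omega⟩
  · rintro ⟨h2, hlt, hprim⟩
    refine ⟨⟨h2, hlt⟩, ?_⟩
    rintro ⟨d, k, hd, hk, hEq, _⟩
    exact hprim d k hd hk hEq

lemma J_char (n m : Int) (hm : 2 ≤ m) (hmn : m ≤ n) :
    ∃ k : ℕ, jmaxLoop n m m 1 = 1 + (k : Int) ∧ m ^ (k+1) ≤ n ∧ n < m ^ (k+2) := by
  obtain ⟨k, h1, h2, h3⟩ := jmax_spec n m hm m 1 hm hmn
  refine ⟨k, h1, ?_, ?_⟩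
  · have he : m ^ (k+1) = m * m ^ k := by ring
    rw [he]; exact h2
  · have he : m ^ (k+2) = m * m ^ (k+1) := by ring
    rw [he]; exact h3

lemma prodList_ge (n J e : Int) (he : e ∈ prodList n J) : 2 ≤ e := by
  obtain ⟨j, b, ⟨hj1, _⟩, ⟨hb2, _⟩, rfl⟩ := (mem_prodList n J e).mp he
  nlinarith

lemma main_count (n : Int) :
    ((bigList n).toFinset.card : Int) =
      ∑ m ∈ ((PySem.List.pyRange 2 (n+1)).toFinset.filter
               (fun m => ¬ (ppOuter n 2 PySem.Set.empty).contains m = true)),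
        ((prodList n (jmaxLoop n m m 1)).toFinset.card : Int) := by
  classical
  set M : Finset Int := ((PySem.List.pyRange 2 (n+1)).toFinset.filter
      (fun m => ¬ (ppOuter n 2 PySem.Set.empty).contains m = true)) with hM
  set F : Int → Finset Int := fun m => (prodList n (jmaxLoop n m m 1)).toFinset with hF
  set Pw : Int → Finset Int := fun m => (F m).image (fun e => m ^ e.toNat) with hPw
  have hunion : (bigList n).toFinset = M.biUnion Pw := by
    ext x
    simp only [List.mem_toFinset, Finset.mem_biUnion, mem_bigList]
    constructor
    · rintro ⟨a, b, ⟨ha2, haN⟩, ⟨hb2, hbN⟩, rfl⟩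
      obtain ⟨m, j, hm2, hma, hprim, hj, hrep⟩ := exists_prim_repI a ha2
      obtain ⟨k, hJ, hk1, hk2⟩ := J_char n m hm2 (by omega)
      refine ⟨m, (hM ▸ (mem_Mfil n m).mpr ⟨hm2, by omega, hprim⟩), ?_⟩
      have hjk : (j : Int) ≤ 1 + (k : Int) := by
        by_contra hgt
        push Not at hgt
        have hj2 : k + 2 ≤ j := by omega
        have hle : m ^ (k+2) ≤ m ^ j := pow_le_pow_right₀ (by omega) hj2
        have han : a ≤ n := by omega
        rw [hrep] at han
        linarith
      refine Finset.mem_image.mpr ⟨(j : Int) * b, ?_, ?_⟩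
      · show (j : Int) * b ∈ (prodList n (jmaxLoop n m m 1)).toFinset
        rw [List.mem_toFinset, mem_prodList]
        exact ⟨(j : Int), b, ⟨by omega, by omega⟩, ⟨hb2, hbN⟩, rfl⟩
      · show m ^ ((j : Int) * b).toNat = a ^ b.toNat
        rw [hrep, ← pow_mul]
        congr 1
        rw [Int.toNat_mul (by omega) (by omega), Int.toNat_natCast]
    · rintro ⟨m, hmM, hx⟩
      obtain ⟨hm2, hmN, hprim⟩ := (mem_Mfil n m).mp (hM ▸ hmM)
      obtain ⟨k, hJ, hk1, hk2⟩ := J_char n m hm2 (by omega)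
      obtain ⟨e, heF, rfl⟩ := Finset.mem_image.mp hx
      have heL := List.mem_toFinset.mp heF
      obtain ⟨j, b, ⟨hj1, hjlt⟩, ⟨hb2, hbN⟩, rfl⟩ := (mem_prodList n _ _).mp heL
      have hjle : j ≤ 1 + (k : Int) := by rw [hJ] at hjlt; omega
      have hjn1 : 1 ≤ j.toNat := by omega
      have ha2 : 2 ≤ m ^ j.toNat := by
        calc (2 : Int) ≤ m := hm2
        _ = m ^ 1 := (pow_one m).symm
        _ ≤ m ^ j.toNat := pow_le_pow_right₀ (by omega) hjn1
      have haN : m ^ j.toNat ≤ n := by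
        calc m ^ j.toNat ≤ m ^ (k+1) := pow_le_pow_right₀ (by omega) (by omega)
        _ ≤ n := hk1
      refine ⟨m ^ j.toNat, b, ⟨ha2, by omega⟩, ⟨hb2, hbN⟩, ?_⟩
      rw [← pow_mul]
      congr 1
      rw [Int.toNat_mul (by omega) (by omega)]
  have hdisj : ∀ m ∈ M, ∀ m' ∈ M, m ≠ m' → Disjoint (Pw m) (Pw m') := by
    intro m hm m' hm' hne
    obtain ⟨hm2, hmN, hprim⟩ := (mem_Mfil n m).mp (hM ▸ hm)
    obtain ⟨hm2', hmN', hprim'⟩ := (mem_Mfil n m').mp (hM ▸ hm')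
    rw [Finset.disjoint_left]
    intro x hxm hxm'
    obtain ⟨e, heF, rfl⟩ := Finset.mem_image.mp hxm
    obtain ⟨e', heF', hEq⟩ := Finset.mem_image.mp hxm'
    have he2 : 2 ≤ e := prodList_ge n _ e (List.mem_toFinset.mp heF)
    have he2' : 2 ≤ e' := prodList_ge n _ e' (List.mem_toFinset.mp heF')
    exact hne (prim_pow_injI hm2 hm2' hprim hprim'
      (by omega : 1 ≤ e.toNat) (by omega : 1 ≤ e'.toNat) hEq.symm).1
  have hcardim : ∀ m ∈ M, (Pw m).card = (F m).card := by
    intro m hm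
    obtain ⟨hm2, hmN, hprim⟩ := (mem_Mfil n m).mp (hM ▸ hm)
    apply Finset.card_image_of_injOn
    intro e he e' he' hEq
    have he2 : 2 ≤ e := prodList_ge n _ e (List.mem_toFinset.mp he)
    have he2' : 2 ≤ e' := prodList_ge n _ e' (List.mem_toFinset.mp he')
    have hN := congrArg Int.toNat hEq
    rw [Int.toNat_pow_of_nonneg (by omega), Int.toNat_pow_of_nonneg (by omega)] at hN
    have := Nat.pow_right_injective (by omega : 2 ≤ m.toNat) hN
    omega
  have hcard : (bigList n).toFinset.card = ∑ m ∈ M, (F m).card := by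
    rw [hunion, Finset.card_biUnion hdisj]
    exact Finset.sum_congr rfl hcardim
  rw [hcard]
  push_cast
  rfl

-- ===== VERDICT (by name: the statement is the Claim_ definition above) =====
theorem dist_powers_spec : Claim_equal_dist_powers := by
  intro n _
  unfold Spec_dist_powers
  rw [A_eq_card, main_count, B_eq_sum]
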